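-- pv_equiv track=rewrite | github.com/jamil-said/code-samples | Python/Python_code_challenges/commonCharacterCount.py | commonCharacterCount
-- ===== SOURCE A (Python) =====
-- def commonCharacterCount(s1, s2):
--     s1_dic, s2_dic = {}, {}
--     res = 0
--     for i in s1:
--         if i in s1_dic:
--             s1_dic[i] += 1
--         else:
--             s1_dic[i] = 1
--     for i in s2:
--         if i in s2_dic:
--             s2_dic[i] += 1
--         else:
--             s2_dic[i] = 1
--     for key, ele in s1_dic.items():
--         if key in s2_dic:
--             res += min(s1_dic[key], s2_dic[key])
--     return res
-- ===== SOURCE B (Python) =====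
-- def commonCharacterCount(s1, s2):
--     a, b = sorted(s1), sorted(s2)
--     i = j = res = 0
--     while i < len(a) and j < len(b):
--         if a[i] == b[j]:
--             res += 1
--             i += 1
--             j += 1
--         elif a[i] < b[j]:
--             i += 1
--         else:
--             j += 1
--     return res
-- ===== Notes on version B (the rewrite author's own statement) =====
-- stated objective: alternative
-- what changed: Replaces the two frequency dictionaries and the min-of-counts pass with sorting both strings and counting matches in a two-pointer merge of the sorted character sequences.
import Mathlib
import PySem

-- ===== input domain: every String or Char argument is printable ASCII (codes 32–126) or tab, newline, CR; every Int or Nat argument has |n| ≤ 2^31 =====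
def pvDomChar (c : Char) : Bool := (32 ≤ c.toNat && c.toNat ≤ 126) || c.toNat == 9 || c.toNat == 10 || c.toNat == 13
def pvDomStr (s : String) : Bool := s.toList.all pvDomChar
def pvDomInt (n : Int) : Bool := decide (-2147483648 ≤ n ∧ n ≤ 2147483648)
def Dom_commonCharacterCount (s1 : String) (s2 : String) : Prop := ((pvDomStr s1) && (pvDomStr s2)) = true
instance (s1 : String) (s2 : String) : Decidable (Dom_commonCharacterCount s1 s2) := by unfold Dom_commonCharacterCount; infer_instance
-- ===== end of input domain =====

-- B replaces A's two frequency dictionaries by sorting both strings and counting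
-- matches in a two-pointer merge (alternative algorithm, same result).

-- ===== PORT A =====
-- the counting loops 'if i in dic: dic[i] += 1 else: dic[i] = 1'
def pvCountLoop (s : List Char) : PySem.Dict Char Int :=
  s.foldl (fun d i => if d.contains i then d.insert i (d.getD i 0 + 1) else d.insert i 1)
    PySem.Dict.empty

-- 's1_dic[key]' is a lookup of a present key: ported as getD _ 0 (exact, the key is in the dict)
def commonCharacterCount (s1 : String) (s2 : String) : Int :=
  let s1_dic := pvCountLoop s1.toList
  let s2_dic := pvCountLoop s2.toList
  s1_dic.items.foldl
    (fun res kv =>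
      if s2_dic.contains kv.1 then res + min (s1_dic.getD kv.1 0) (s2_dic.getD kv.1 0)
      else res) 0

-- ===== PORT B =====
-- the while loop with indices i, j: recursion on the two (sorted) suffixes
def mergeCommon : List Char → List Char → Int
  | [], _ => 0
  | _ :: _, [] => 0
  | a :: t1, b :: t2 =>
      if a = b then mergeCommon t1 t2 + 1
      else if a < b then mergeCommon t1 (b :: t2)
      else mergeCommon (a :: t1) t2
termination_by l1 l2 => l1.length + l2.length
decreasing_by all_goals (simp only [List.length_cons]; omega)

def commonCharacterCount_alt (s1 : String) (s2 : String) : Int :=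
  mergeCommon (PySem.List.sorted s1.toList (fun c => c) false)
              (PySem.List.sorted s2.toList (fun c => c) false)

-- ===== PRECONDITION & SPEC =====
def Spec_commonCharacterCount (s1 : String) (s2 : String) (out : Int) : Prop := out = commonCharacterCount_alt s1 s2
instance (s1 : String) (s2 : String) (out : Int) : Decidable (Spec_commonCharacterCount s1 s2 out) := by unfold Spec_commonCharacterCount; infer_instance

-- ===== CLAIM (what is proved, stated in full; the proofs are below) =====
def Claim_equal_commonCharacterCount : Prop := ∀ (s1 : String) (s2 : String), Dom_commonCharacterCount s1 s2 → Spec_commonCharacterCount s1 s2 (commonCharacterCount s1 s2)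

-- ===== LEMMAS AND PROOFS =====

-- both sides equal the cardinality of the multiset intersection of the character lists

lemma pvCountLoop_eq_counter (s : List Char) : pvCountLoop s = PySem.Dict.counter s := by
  unfold pvCountLoop
  rw [PySem.List.foldl_congr_mem _ _ (fun d i => d.insert i (d.getD i 0 + 1)) _ (by
    intro d i _
    by_cases h : d.contains i = true
    · simp [h]
    · simp [h, PySem.Dict.getD_of_not_contains d (0 : Int) (by simpa using h)])]
  exact PySem.Dict.foldl_insert_getD_add_one_eq_counter s

lemma card_inter_eq_sum (l1 l2 : List Char) :
    ((l1 : Multiset Char) ∩ (l2 : Multiset Char)).card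
      = ∑ a ∈ l1.toFinset, min (l1.count a) (l2.count a) := by
  rw [← Multiset.toFinset_sum_count_eq (((l1 : Multiset Char) ∩ (l2 : Multiset Char)))]
  rw [show ∑ a ∈ (((l1 : Multiset Char) ∩ (l2 : Multiset Char))).toFinset,
        Multiset.count a (((l1 : Multiset Char) ∩ (l2 : Multiset Char)))
      = ∑ a ∈ l1.toFinset, Multiset.count a (((l1 : Multiset Char) ∩ (l2 : Multiset Char))) from
    Finset.sum_subset
      (by
        intro x hx
        simp only [Multiset.mem_toFinset, Multiset.mem_inter, Multiset.mem_coe] at hx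
        simpa [List.mem_toFinset] using hx.1)
      (by
        intro x _ hx
        simp only [Multiset.mem_toFinset] at hx
        exact Multiset.count_eq_zero_of_notMem hx)]
  exact Finset.sum_congr rfl fun a _ => by
    simp [Multiset.coe_count]

lemma A_eq_card (l1 l2 : List Char) :
    (PySem.Dict.counter l1).items.foldl
      (fun res kv =>
        if (PySem.Dict.counter l2).contains kv.1
        then res + min ((PySem.Dict.counter l1).getD kv.1 0) ((PySem.Dict.counter l2).getD kv.1 0)
        else res) 0
    = (((l1 : Multiset Char) ∩ (l2 : Multiset Char)).card : Int) := by
  rw [PySem.List.foldl_congr_mem _ _ (fun res kv =>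
        res + (if l2.contains kv.1 then min ((l1.count kv.1 : Int)) ((l2.count kv.1 : Int)) else 0)) _
      (by
        intro acc kv _
        rw [PySem.Dict.contains_counter, PySem.Dict.getD_counter, PySem.Dict.getD_counter]
        by_cases h : kv.1 ∈ l2 <;> simp [h])]
  rw [PySem.List.foldl_add, PySem.Dict.items_counter, List.map_map, zero_add]
  rw [List.map_congr_left (g := fun k =>
        ((min (l1.count k) (l2.count k) : Nat) : Int)) (by
      intro k _
      by_cases h : k ∈ l2
      · simp [h, Nat.cast_min]
      · simp [Function.comp, h, List.count_eq_zero_of_not_mem h])]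
  have hnd : (PySem.Set.ofList l1 : List Char).Nodup := PySem.Set.nodup_ofList l1
  have hfs : (PySem.Set.ofList l1 : List Char).toFinset = l1.toFinset := by
    apply Finset.ext
    intro a
    simp [List.mem_toFinset, PySem.Set.mem_ofList]
  rw [← List.sum_toFinset _ hnd, hfs, card_inter_eq_sum l1 l2]
  push_cast
  rfl

lemma cons_inter_cons_eq (a : Char) (t1 t2 : List Char) :
    ((a :: t1 : List Char) : Multiset Char) ∩ ((a :: t2 : List Char) : Multiset Char)
      = a ::ₘ (((t1 : List Char) : Multiset Char) ∩ ((t2 : List Char) : Multiset Char)) := by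
  apply Multiset.ext.mpr
  intro x
  rw [Multiset.count_inter, ← Multiset.cons_coe, ← Multiset.cons_coe, Multiset.count_cons,
    Multiset.count_cons, Multiset.count_cons, Multiset.count_inter]
  by_cases hx : x = a <;> simp [hx]

lemma cons_inter_of_notMem (a : Char) (t1 l2 : List Char) (h : a ∉ l2) :
    ((a :: t1 : List Char) : Multiset Char) ∩ ((l2 : List Char) : Multiset Char)
      = ((t1 : List Char) : Multiset Char) ∩ ((l2 : List Char) : Multiset Char) := by
  apply Multiset.ext.mpr
  intro x
  rw [Multiset.count_inter, ← Multiset.cons_coe, Multiset.count_cons, Multiset.count_inter]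
  by_cases hx : x = a
  · have h0 : List.count a l2 = 0 := List.count_eq_zero.mpr h
    simp [hx, h0]
  · simp [hx]

lemma inter_cons_of_notMem (b : Char) (l1 t2 : List Char) (h : b ∉ l1) :
    ((l1 : List Char) : Multiset Char) ∩ ((b :: t2 : List Char) : Multiset Char)
      = ((l1 : List Char) : Multiset Char) ∩ ((t2 : List Char) : Multiset Char) := by
  apply Multiset.ext.mpr
  intro x
  rw [Multiset.count_inter, ← Multiset.cons_coe, Multiset.count_cons, Multiset.count_inter]
  by_cases hx : x = b
  · have h0 : List.count b l1 = 0 := List.count_eq_zero.mpr h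
    simp [hx, h0]
  · simp [hx]

lemma mergeCommon_eq_card (l1 l2 : List Char)
    (h1 : l1.Pairwise (· ≤ ·)) (h2 : l2.Pairwise (· ≤ ·)) :
    mergeCommon l1 l2 = (((l1 : Multiset Char) ∩ (l2 : Multiset Char)).card : Int) := by
  induction l1, l2 using mergeCommon.induct with
  | case1 l2 => simp [mergeCommon]
  | case2 a t1 => simp [mergeCommon]
  | case3 t1 b t2 ih =>
      rw [mergeCommon, if_pos rfl, cons_inter_cons_eq, Multiset.card_cons,
        ih (List.Pairwise.of_cons h1) (List.Pairwise.of_cons h2)]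
      push_cast; ring
  | case4 a t1 b t2 hab hlt ih =>
      have hna : a ∉ (b :: t2) := by
        intro hm
        rcases List.mem_cons.mp hm with h | h
        · exact hab h
        · exact absurd ((List.pairwise_cons.mp h2).1 a h) (not_le.mpr hlt)
      rw [mergeCommon, if_neg hab, if_pos hlt, cons_inter_of_notMem a t1 _ hna,
        ih (List.Pairwise.of_cons h1) h2]
  | case5 a t1 b t2 hab hnlt ih =>
      have hba : b < a := lt_of_le_of_ne (not_lt.mp hnlt) fun h => hab h.symm
      have hnb : b ∉ (a :: t1) := by
        intro hm
        rcases List.mem_cons.mp hm with h | h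
        · exact absurd h.symm hab
        · exact absurd ((List.pairwise_cons.mp h1).1 b h) (not_le.mpr hba)
      rw [mergeCommon, if_neg hab, if_neg hnlt, inter_cons_of_notMem b _ t2 hnb,
        ih h1 (List.Pairwise.of_cons h2)]

-- ===== VERDICT (by name: the statement is the Claim_ definition above) =====
theorem commonCharacterCount_spec : Claim_equal_commonCharacterCount := by
  intro s1 s2 _
  unfold Spec_commonCharacterCount commonCharacterCount commonCharacterCount_alt
  rw [pvCountLoop_eq_counter, pvCountLoop_eq_counter, A_eq_card]
  have h1 := PySem.List.sorted_pairwise s1.toList (fun c => c)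
  have h2 := PySem.List.sorted_pairwise s2.toList (fun c => c)
  rw [mergeCommon_eq_card _ _ h1 h2,
    Multiset.coe_eq_coe.mpr (PySem.List.sorted_perm s1.toList (fun c => c) false),
    Multiset.coe_eq_coe.mpr (PySem.List.sorted_perm s2.toList (fun c => c) false)]
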